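-- pv_equiv track=rewrite | github.com/alexander-turner/TurnTrout.com | scripts/strip_quotes.py | get_quote_level
-- ===== SOURCE A (Python) =====
-- def get_quote_level(line: str) -> int:
--     """
--     Count the blockquote nesting level of a line.
--
--     Each ``>`` character at the start (with optional surrounding
--     spaces) adds one level. Returns 0 for non-blockquote lines.
--     """
--     level = 0
--     i = 0
--     while i < len(line):
--         if line[i] == ">":
--             level += 1
--             i += 1
--             # Skip optional space after >
--             if i < len(line) and line[i] == " ":
--                 i += 1
--         elif line[i] == " ":
--             i += 1
--         else:
--             break
--     return level
-- ===== SOURCE B (Python) =====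
-- def get_quote_level(line: str) -> int:
--     """Count blockquote nesting: quote chars in the maximal leading run of spaces and quote chars."""
--     stripped = line.lstrip(" >")
--     prefix = line[:len(line) - len(stripped)]
--     return prefix.count(">")
-- ===== Notes on version B (the rewrite author's own statement) =====
-- stated objective: simpler
-- what changed: Replaces A's stateful index/while loop (level counter with optional-space skipping) by isolating the maximal leading run of space/quote characters via lstrip and counting the quote characters in that prefix.
import Mathlib
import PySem

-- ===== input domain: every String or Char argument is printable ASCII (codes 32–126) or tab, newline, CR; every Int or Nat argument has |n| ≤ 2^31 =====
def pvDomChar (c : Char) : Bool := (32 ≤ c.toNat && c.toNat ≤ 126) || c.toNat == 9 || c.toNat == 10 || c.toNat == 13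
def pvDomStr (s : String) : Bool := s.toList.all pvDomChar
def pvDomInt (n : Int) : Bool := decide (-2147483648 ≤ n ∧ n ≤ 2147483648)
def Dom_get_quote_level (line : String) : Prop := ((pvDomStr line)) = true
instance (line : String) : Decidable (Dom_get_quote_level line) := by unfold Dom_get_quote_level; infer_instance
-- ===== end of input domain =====

-- B isolates the maximal leading run of space/greater-than chars with lstrip and counts the quote chars there, replacing A's stateful index loop (simpler decomposition).


-- ===== PORT A =====
-- A's while loop over index i with mutable level, transcribed as recursion on the remaining
-- suffix of the chars ('i < len(line) and line[i] == " "' becomes a head? test on the rest).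
def getQuoteLoop : List Char → Int → Int
  | [], level => level
  | c :: rest, level =>
    if c = '>' then
      -- level += 1; i += 1; then skip optional space after >
      if rest.head? = some ' ' then getQuoteLoop rest.tail (level + 1)
      else getQuoteLoop rest (level + 1)
    else if c = ' ' then getQuoteLoop rest level
    else level
  termination_by cs _ => cs.length
  decreasing_by all_goals (simp [List.length_tail]; try omega)

def get_quote_level (line : String) : Int := getQuoteLoop line.toList 0

-- ===== PORT B =====
-- line.lstrip(" >") ported by hand as dropWhile over the code points (exact: str.lstrip with an
-- explicit char set drops exactly the leading chars in that set); the slice and count on List Char.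
def get_quote_level_alt (line : String) : Int :=
  let cs := line.toList
  let stripped := cs.dropWhile (fun c => c == ' ' || c == '>')
  let pre := cs.take (cs.length - stripped.length)   -- line[:len(line) - len(stripped)]
  (pre.count '>' : Int)

-- ===== PRECONDITION & SPEC =====
def Spec_get_quote_level (line : String) (out : Int) : Prop := out = get_quote_level_alt line
instance (line : String) (out : Int) : Decidable (Spec_get_quote_level line out) := by unfold Spec_get_quote_level; infer_instance

-- ===== CLAIM (what is proved, stated in full; the proofs are below) =====
def Claim_equal_get_quote_level : Prop := ∀ (line : String), Dom_get_quote_level line → Spec_get_quote_level line (get_quote_level line)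

-- ===== LEMMAS AND PROOFS =====

-- The prefix B takes is exactly the takeWhile of the space/quote predicate.
theorem take_sub_dropWhile (p : Char → Bool) (cs : List Char) :
    cs.take (cs.length - (cs.dropWhile p).length) = cs.takeWhile p := by
  induction cs with
  | nil => simp
  | cons c t ih =>
    by_cases hp : p c
    · have hle : (t.dropWhile p).length ≤ t.length := List.length_dropWhile_le p t
      have h2 : t.length + 1 - (t.dropWhile p).length
          = (t.length - (t.dropWhile p).length) + 1 := by omega
      simp [List.dropWhile, List.takeWhile, hp, h2, ih]
    · simp [List.dropWhile, List.takeWhile, hp]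

-- A's loop computes level plus the count of quote chars in the maximal leading space/quote run.
theorem getQuoteLoop_eq (cs : List Char) (level : Int) :
    getQuoteLoop cs level
      = level + ((cs.takeWhile (fun c => c == ' ' || c == '>')).count '>' : Int) := by
  fun_induction getQuoteLoop cs level with
  | case1 level => simp [List.takeWhile]
  | case2 rest level hsp ih =>
    cases rest with
    | nil => simp at hsp
    | cons d r =>
      simp at hsp
      subst hsp
      simp only [List.tail_cons] at ih
      simp [List.takeWhile, ih]
      ring
  | case3 rest level hsp ih =>
    rw [ih]
    cases rest with
    | nil => simp [List.takeWhile]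
    | cons d r =>
      simp at hsp
      have hd : (d == ' ') = false := by simp [hsp]
      simp [List.takeWhile, hd]
      by_cases hdg : d = '>'
      · simp [hdg]; ring
      · ring
  | case4 rest level hc ih =>
    simp [List.takeWhile, ih]
  | case5 c rest level hc hsp =>
    have hcc : (c == ' ' || c == '>') = false := by simp [hc, hsp]
    simp [List.takeWhile, hcc]

-- ===== VERDICT (by name: the statement is the Claim_ definition above) =====
theorem get_quote_level_spec : Claim_equal_get_quote_level := by
  intro line _
  show getQuoteLoop line.toList 0 = get_quote_level_alt line
  simp only [get_quote_level_alt]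
  rw [getQuoteLoop_eq, take_sub_dropWhile]
  ring
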